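-- pv_equiv track=rewrite | github.com/jeremy-schaab/MarkdownTool | markdown_viewer.py | _preprocess_mermaid
-- ===== SOURCE A (Python) =====
-- def _preprocess_mermaid(md_text: str) -> str:
--     """Convert mermaid code fences or graph TB blocks into raw mermaid divs.
--
--     Supports:
--     - ```mermaid ... ```
--     - ``` (first non-empty line starts with graph/flowchart)
--     """
--     lines = md_text.split("\n")
--     out = []
--     i = 0
--     in_fence = False
--     fence_lang = None
--     buf = []
--
--     def is_mermaid_block(text_block: list[str]) -> bool:
--         # Find first non-empty content line
--         for t in text_block:
--             s = t.strip()
--             if not s: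
--                 continue
--             # Mermaid flowchart keywords
--             if s.lower().startswith("graph "):
--                 return True
--             if s.lower().startswith("flowchart "):
--                 return True
--             return False
--         return False
--
--     while i < len(lines):
--         line = lines[i]
--         if not in_fence:
--             if line.startswith("```"):
--                 in_fence = True
--                 fence_lang = line.strip().lstrip("`").strip()  # capture language after ```
--                 buf = []
--             else:
--                 out.append(line)
--         else:
--             # inside fence
--             if line.startswith("```"):
--                 # fence end
--                 content_lines = buf
--                 is_mermaid = (fence_lang.lower() == "mermaid") if fence_lang else False
--                 if not is_mermaid:
--                     # Detect graph TB/TD/LR/RL or flowchart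
--                     is_mermaid = is_mermaid_block(content_lines)
--
--                 if is_mermaid:
--                     out.append("<div class=\"mermaid\">")
--                     out.extend(content_lines)
--                     out.append("</div>")
--                 else:
--                     # restore original fenced block
--                     fence_header = "```" + (fence_lang if fence_lang else "")
--                     out.append(fence_header)
--                     out.extend(content_lines)
--                     out.append("```")
--
--                 in_fence = False
--                 fence_lang = None
--                 buf = []
--             else:
--                 buf.append(line)
--         i += 1
--
--     # If file ends while still in fence, just flush as original
--     if in_fence:
--         fence_header = "```" + (fence_lang if fence_lang else "")
--         out.append(fence_header)
--         out.extend(buf)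
--         # Do not append closing fence; keep as-is for visibility
--
--     return "\n".join(out)
-- ===== SOURCE B (Python) =====
-- def _preprocess_mermaid(md_text: str) -> str:
--     """Convert mermaid code fences or graph/flowchart ``` blocks into raw mermaid divs.
--
--     Block-at-a-time scan: on a fence opener, skip ahead to the matching closer
--     and emit the whole block at once (no in_fence state machine)."""
--     lines = md_text.split("\n")
--     n = len(lines)
--     out = []
--     i = 0
--     while i < n:
--         line = lines[i]
--         if not line.startswith("```"):
--             out.append(line)
--             i += 1
--             continue
--         lang = line.strip().lstrip("`").strip()
--         j = i + 1
--         while j < n and not lines[j].startswith("```"):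
--             j += 1
--         body = lines[i + 1:j]
--         if j == n:
--             # unterminated fence: flush header + remaining lines, no closer
--             out.append("```" + lang)
--             out.extend(body)
--             i = j
--         else:
--             if lang.lower() == "mermaid" or _looks_mermaid(body):
--                 out.append('<div class="mermaid">')
--                 out.extend(body)
--                 out.append("</div>")
--             else:
--                 out.append("```" + lang)
--                 out.extend(body)
--                 out.append("```")
--             i = j + 1
--     return "\n".join(out)
--
--
-- def _looks_mermaid(body):
--     for t in body:
--         s = t.strip()
--         if s:
--             sl = s.lower()
--             return sl.startswith("graph ") or sl.startswith("flowchart ")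
--     return False
-- ===== Notes on version B (the rewrite author's own statement) =====
-- stated objective: alternative
-- what changed: Replaces A's line-by-line state machine (in_fence flag, fence_lang, buf accumulator) with a block-at-a-time scan that, on each fence opener, skips ahead to the matching closer and emits the whole block at once.
import Mathlib
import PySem

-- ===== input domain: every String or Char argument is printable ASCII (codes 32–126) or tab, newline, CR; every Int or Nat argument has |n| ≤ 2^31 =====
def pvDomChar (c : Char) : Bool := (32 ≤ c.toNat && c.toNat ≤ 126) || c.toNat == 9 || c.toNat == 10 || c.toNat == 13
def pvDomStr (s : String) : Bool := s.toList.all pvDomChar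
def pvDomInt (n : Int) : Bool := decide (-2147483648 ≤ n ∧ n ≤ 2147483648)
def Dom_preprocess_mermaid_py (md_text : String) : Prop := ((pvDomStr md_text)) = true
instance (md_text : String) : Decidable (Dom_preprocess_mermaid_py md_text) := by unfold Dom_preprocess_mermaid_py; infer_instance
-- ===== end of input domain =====

-- B replaces A's in_fence/fence_lang/buf state machine by a block-at-a-time scan
-- (skip ahead to the matching closer and emit each fence block at once); alternative, same cost.

-- ===== PORT A =====

-- A's nested helper is_mermaid_block: first non-empty stripped line decides
def pmA_isMermaidBlock : List String → Bool
  | [] => false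
  | t :: ts =>
    let s := PySem.Str.strip t
    if s = "" then pmA_isMermaidBlock ts
    else if PySem.Str.startswith (PySem.Str.lower s) "graph " then true
    else if PySem.Str.startswith (PySem.Str.lower s) "flowchart " then true
    else false

-- line.strip().lstrip("`").strip() ; lstrip("`") ported by hand as dropWhile (· == '`'),
-- exact: Python lstrip with a one-char set removes exactly the leading occurrences of that char
def pmA_fenceLang (line : String) : String :=
  PySem.Str.strip (String.mk ((PySem.Str.strip line).toList.dropWhile (fun c => c == '`')))

-- the while loop, state = (in_fence, fence_lang : Option String, buf, out)
def pmA_loop : List String → Bool → Option String → List String → List String → List String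
  | [], in_fence, fence_lang, buf, out =>
    if in_fence then
      let fh := "```" ++ (match fence_lang with
        | some l => if l ≠ "" then l else ""
        | none => "")
      (out ++ [fh]) ++ buf
    else out
  | line :: rest, in_fence, fence_lang, buf, out =>
    if !in_fence then
      if PySem.Str.startswith line "```" then
        pmA_loop rest true (some (pmA_fenceLang line)) [] out
      else
        pmA_loop rest false fence_lang buf (out ++ [line])
    else
      if PySem.Str.startswith line "```" then
        let isM0 : Bool := match fence_lang with
          | some l => if l ≠ "" then PySem.Str.lower l == "mermaid" else false
          | none => false
        let isM : Bool := if isM0 then isM0 else pmA_isMermaidBlock buf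
        if isM then
          pmA_loop rest false none [] (((out ++ ["<div class=\"mermaid\">"]) ++ buf) ++ ["</div>"])
        else
          let fh := "```" ++ (match fence_lang with
            | some l => if l ≠ "" then l else ""
            | none => "")
          pmA_loop rest false none [] (((out ++ [fh]) ++ buf) ++ ["```"])
      else
        pmA_loop rest true fence_lang (buf ++ [line]) out

def preprocess_mermaid_py (md_text : String) : String :=
  PySem.Str.join "\n" (pmA_loop ((PySem.Str.split? md_text "\n").getD []) false none [] [])

-- ===== PORT B =====

-- B's helper _looks_mermaid
def pmB_looksMermaid : List String → Bool
  | [] => false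
  | t :: ts =>
    let s := PySem.Str.strip t
    if s ≠ "" then
      let sl := PySem.Str.lower s
      PySem.Str.startswith sl "graph " || PySem.Str.startswith sl "flowchart "
    else pmB_looksMermaid ts

def pmB_lang (line : String) : String :=
  PySem.Str.strip (String.mk ((PySem.Str.strip line).toList.dropWhile (fun c => c == '`')))

-- block-at-a-time scan: on an opener, take the body up to the next fence line and emit the block
def pmB_go : List String → List String
  | [] => []
  | line :: rest =>
    if PySem.Str.startswith line "```" then
      let lang := pmB_lang line
      let body := rest.takeWhile (fun l => !PySem.Str.startswith l "```")
      match h : rest.dropWhile (fun l => !PySem.Str.startswith l "```") with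
      | [] => ("```" ++ lang) :: body
      | _ :: tail =>
        (if PySem.Str.lower lang == "mermaid" || pmB_looksMermaid body then
          "<div class=\"mermaid\">" :: (body ++ ["</div>"])
        else
          ("```" ++ lang) :: (body ++ ["```"])) ++ pmB_go tail
    else
      line :: pmB_go rest
termination_by lines => lines.length
decreasing_by
  · have h1 : tail.length + 1 ≤ rest.length := by
      have := List.length_dropWhile_le (fun l => !PySem.Str.startswith l "```") rest
      rw [h] at this; simpa using this
    simp; omega
  · simp

def preprocess_mermaid_py_alt (md_text : String) : String :=
  PySem.Str.join "\n" (pmB_go ((PySem.Str.split? md_text "\n").getD []))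

-- ===== PRECONDITION & SPEC =====
def Spec_preprocess_mermaid_py (md_text : String) (out : String) : Prop := out = preprocess_mermaid_py_alt md_text
instance (md_text : String) (out : String) : Decidable (Spec_preprocess_mermaid_py md_text out) := by unfold Spec_preprocess_mermaid_py; infer_instance

-- ===== CLAIM (what is proved, stated in full; the proofs are below) =====
def Claim_equal_preprocess_mermaid_py : Prop := ∀ (md_text : String), Dom_preprocess_mermaid_py md_text → Spec_preprocess_mermaid_py md_text (preprocess_mermaid_py md_text)

-- ===== LEMMAS AND PROOFS =====

def hdrOf (lang : Option String) : String :=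
  "```" ++ (match lang with
    | some l => if l ≠ "" then l else ""
    | none => "")

-- unfolding lemmas for pmA_loop (definitional)
lemma loop_nil (f : Bool) (lang : Option String) (buf out : List String) :
    pmA_loop [] f lang buf out = if f then (out ++ [hdrOf lang]) ++ buf else out := rfl

lemma loop_cons (line : String) (rest : List String) (f : Bool) (lang : Option String)
    (buf out : List String) :
    pmA_loop (line :: rest) f lang buf out =
      if !f then
        (if PySem.Str.startswith line "```" then
          pmA_loop rest true (some (pmA_fenceLang line)) [] out
        else
          pmA_loop rest false lang buf (out ++ [line]))
      else
        (if PySem.Str.startswith line "```" then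
          (let isM0 : Bool := match lang with
            | some l => if l ≠ "" then PySem.Str.lower l == "mermaid" else false
            | none => false
          let isM : Bool := if isM0 then isM0 else pmA_isMermaidBlock buf
          if isM then
            pmA_loop rest false none [] (((out ++ ["<div class=\"mermaid\">"]) ++ buf) ++ ["</div>"])
          else
            pmA_loop rest false none [] (((out ++ [hdrOf lang]) ++ buf) ++ ["```"]))
        else
          pmA_loop rest true lang (buf ++ [line]) out) := rfl

-- A's isM0 test on a present language equals B's direct lower-lang test
lemma langTest_eq (l : String) :
    (if l ≠ "" then PySem.Str.lower l == "mermaid" else false) = (PySem.Str.lower l == "mermaid") := by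
  by_cases h : l = ""
  · subst h; decide
  · simp [h]

-- A's nested is_mermaid_block equals B's _looks_mermaid
lemma looks_eq (b : List String) : pmA_isMermaidBlock b = pmB_looksMermaid b := by
  induction b with
  | nil => rfl
  | cons t ts ih =>
    simp only [pmA_isMermaidBlock, pmB_looksMermaid]
    by_cases hs : PySem.Str.strip t = "" <;> simp [hs, ih]

-- what A produces once inside a fence with language l and accumulated buf
def fenceResult (l : String) (buf lines : List String) : List String :=
  let body := lines.takeWhile (fun s => !PySem.Str.startswith s "```")
  match lines.dropWhile (fun s => !PySem.Str.startswith s "```") with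
  | [] => ("```" ++ l) :: (buf ++ body)
  | _ :: tail =>
    (if PySem.Str.lower l == "mermaid" || pmB_looksMermaid (buf ++ body) then
      "<div class=\"mermaid\">" :: ((buf ++ body) ++ ["</div>"])
    else
      ("```" ++ l) :: ((buf ++ body) ++ ["```"])) ++ pmB_go tail

lemma main_lemma : ∀ lines : List String,
    (∀ (lang : Option String) (buf out : List String),
        pmA_loop lines false lang buf out = out ++ pmB_go lines) ∧
    (∀ (l : String) (buf out : List String),
        pmA_loop lines true (some l) buf out = out ++ fenceResult l buf lines) := by
  intro lines
  induction lines with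
  | nil =>
    constructor
    · intro lang buf out; simp [loop_nil, pmB_go]
    · intro l buf out
      rw [loop_nil]
      simp only [fenceResult, List.takeWhile_nil, List.dropWhile_nil, hdrOf]
      by_cases h : l = "" <;> simp [h]
  | cons line rest ih =>
    obtain ⟨ihN, ihF⟩ := ih
    constructor
    · intro lang buf out
      by_cases hf : PySem.Str.startswith line "```"
      · rw [loop_cons]
        simp only [Bool.not_false, if_true, hf, ihF]
        rw [pmB_go, if_pos hf]
        unfold fenceResult
        cases hd : rest.dropWhile (fun s => !PySem.Str.startswith s "```") <;>
          simp [hd, pmA_fenceLang, pmB_lang]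
      · rw [loop_cons]
        simp only [Bool.not_false, if_true, hf, if_false, ihN]
        rw [pmB_go, if_neg hf]
        simp
    · intro l buf out
      by_cases hf : PySem.Str.startswith line "```"
      · rw [loop_cons]
        simp only [Bool.not_true, Bool.false_eq_true, if_false, hf, if_true, langTest_eq, looks_eq]
        unfold fenceResult
        rw [List.dropWhile_cons_of_neg (by simpa using hf), List.takeWhile_cons_of_neg (by simpa using hf)]
        cases hL : (PySem.Str.lower l == "mermaid")
        · cases hB : pmB_looksMermaid buf
          · by_cases he : l = ""
            · subst he; simp [hL, hB, ihN, hdrOf]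
            · simp [hL, hB, ihN, hdrOf, he]
          · simp [hL, hB, ihN]
        · simp [hL, ihN]
      · rw [loop_cons]
        simp only [Bool.not_true, Bool.false_eq_true, if_false, hf, ihF]
        unfold fenceResult
        rw [List.dropWhile_cons_of_pos (by simpa using hf),
            List.takeWhile_cons_of_pos (by simpa using hf)]
        cases hd : rest.dropWhile (fun s => !PySem.Str.startswith s "```") <;> simp [hd]

-- ===== VERDICT (by name: the statement is the Claim_ definition above) =====
theorem preprocess_mermaid_py_spec : Claim_equal_preprocess_mermaid_py := by
  intro md _
  unfold Spec_preprocess_mermaid_py preprocess_mermaid_py preprocess_mermaid_py_alt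
  rw [(main_lemma _).1]
  simp
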